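-- pv_equiv track=rewrite | github.com/simongu20070911/department_of_market_intelligence | tests/test_enhanced_validator_prompts.py | get_validation_context
-- ===== SOURCE A (Python) =====
-- def get_validation_context(session_state):
--     """Simple validation context detection for testing."""
--     current_task = session_state.get('current_task', '')
--     artifact_path = session_state.get('artifact_to_validate', '')
--
--     if 'generate_initial_plan' in current_task or 'refine_plan' in current_task:
--         return 'research_plan'
--     elif 'implementation_manifest' in artifact_path or 'implementation_plan' in current_task:
--         return 'implementation_manifest'
--     elif 'extract_results' in artifact_path or 'results_extraction' in current_task:
--         return 'results_extraction'
--     elif 'experiment' in current_task or 'execution_log' in artifact_path: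
--         return 'experiment_execution'
--     elif any(ext in artifact_path for ext in ['.py', '.ipynb', '_code.', '_implementation.']):
--         return 'code_implementation'
--     else:
--         return 'research_plan'
-- ===== SOURCE B (Python) =====
-- LABELS = ['research_plan', 'implementation_manifest', 'results_extraction',
--           'experiment_execution', 'code_implementation']
--
-- # flat pattern list: (priority, field, substring)
-- PATTERNS = [
--     (0, 'task', 'generate_initial_plan'),
--     (0, 'task', 'refine_plan'),
--     (1, 'artifact', 'implementation_manifest'),
--     (1, 'task', 'implementation_plan'),
--     (2, 'artifact', 'extract_results'),
--     (2, 'task', 'results_extraction'),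
--     (3, 'task', 'experiment'),
--     (3, 'artifact', 'execution_log'),
--     (4, 'artifact', '.py'),
--     (4, 'artifact', '.ipynb'),
--     (4, 'artifact', '_code.'),
--     (4, 'artifact', '_implementation.'),
-- ]
--
--
-- def get_validation_context(session_state):
--     """Min-priority classification: collect every matched pattern's priority,
--     the smallest one names the context (empty -> priority 0)."""
--     text = {
--         'task': session_state.get('current_task', ''),
--         'artifact': session_state.get('artifact_to_validate', ''),
--     }
--     matched = [prio for prio, field, sub in PATTERNS if sub in text[field]]
--     return LABELS[min(matched, default=0)]
-- ===== Notes on version B (the rewrite author's own statement) =====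
-- stated objective: alternative
-- what changed: Replaced the ordered if/elif chain (first match wins, early return) by a no-short-circuit computation: collect the priority indices of ALL matched patterns from one flat (priority, field, substring) list, take their minimum (default 0 when nothing matches), and index a label table with it.
import Mathlib
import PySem

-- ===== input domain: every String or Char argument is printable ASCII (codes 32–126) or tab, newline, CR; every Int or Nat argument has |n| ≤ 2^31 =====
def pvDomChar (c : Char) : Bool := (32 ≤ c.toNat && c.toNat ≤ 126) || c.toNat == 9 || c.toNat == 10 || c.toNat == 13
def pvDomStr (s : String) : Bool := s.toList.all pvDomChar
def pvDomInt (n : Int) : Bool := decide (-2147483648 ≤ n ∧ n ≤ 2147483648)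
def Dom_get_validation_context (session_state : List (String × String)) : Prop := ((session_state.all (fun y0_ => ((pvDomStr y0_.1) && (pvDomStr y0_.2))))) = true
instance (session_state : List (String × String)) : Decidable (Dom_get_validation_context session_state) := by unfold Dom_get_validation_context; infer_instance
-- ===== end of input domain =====

-- ===== PORT A =====
-- B drops the ordered if/elif chain: it collects the priorities of ALL matched patterns
-- from one flat (priority, field, substring) list and indexes a label table with their
-- minimum (default 0 when nothing matches). Objective: alternative decomposition.
def get_validation_context (session_state : List (String × String)) : String :=
  let d := PySem.Dict.ofList session_state
  let current_task := d.getD "current_task" ""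
  let artifact_path := d.getD "artifact_to_validate" ""
  if PySem.Str.isIn "generate_initial_plan" current_task || PySem.Str.isIn "refine_plan" current_task then
    "research_plan"
  else if PySem.Str.isIn "implementation_manifest" artifact_path || PySem.Str.isIn "implementation_plan" current_task then
    "implementation_manifest"
  else if PySem.Str.isIn "extract_results" artifact_path || PySem.Str.isIn "results_extraction" current_task then
    "results_extraction"
  else if PySem.Str.isIn "experiment" current_task || PySem.Str.isIn "execution_log" artifact_path then
    "experiment_execution"
  else if ([".py", ".ipynb", "_code.", "_implementation."] : List String).any (fun ext => PySem.Str.isIn ext artifact_path) then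
    "code_implementation"
  else
    "research_plan"

-- ===== PORT B =====
def gvcLabels : List String :=
  ["research_plan", "implementation_manifest", "results_extraction",
   "experiment_execution", "code_implementation"]

def gvcPatterns : List (Nat × String × String) :=
  [ (0, "task", "generate_initial_plan"),
    (0, "task", "refine_plan"),
    (1, "artifact", "implementation_manifest"),
    (1, "task", "implementation_plan"),
    (2, "artifact", "extract_results"),
    (2, "task", "results_extraction"),
    (3, "task", "experiment"),
    (3, "artifact", "execution_log"),
    (4, "artifact", ".py"),
    (4, "artifact", ".ipynb"),
    (4, "artifact", "_code."),
    (4, "artifact", "_implementation.") ]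

def get_validation_context_alt (session_state : List (String × String)) : String :=
  let d := PySem.Dict.ofList session_state
  let text := (PySem.Dict.empty.insert "task" (d.getD "current_task" "")).insert
                "artifact" (d.getD "artifact_to_validate" "")
  -- [prio for prio, field, sub in PATTERNS if sub in text[field]]
  let matched := gvcPatterns.filterMap
    (fun p => if PySem.Str.isIn p.2.2 (text.getD p.2.1 "") then some p.1 else none)
  -- LABELS[min(matched, default=0)]; the index is always 0..4, inside the table
  PySem.List.pyGetD gvcLabels (Int.ofNat ((PySem.List.min? matched (fun x => x)).getD 0)) ""

-- ===== PRECONDITION & SPEC =====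
def Spec_get_validation_context (session_state : List (String × String)) (out : String) : Prop := out = get_validation_context_alt session_state
instance (session_state : List (String × String)) (out : String) : Decidable (Spec_get_validation_context session_state out) := by unfold Spec_get_validation_context; infer_instance

-- ===== CLAIM (what is proved, stated in full; the proofs are below) =====
def Claim_equal_get_validation_context : Prop := ∀ (session_state : List (String × String)), Dom_get_validation_context session_state → Spec_get_validation_context session_state (get_validation_context session_state)

-- ===== LEMMAS AND PROOFS =====
set_option maxHeartbeats 1600000 in
theorem gvc_eq (t a : String) :
    (if PySem.Str.isIn "generate_initial_plan" t || PySem.Str.isIn "refine_plan" t then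
      "research_plan"
    else if PySem.Str.isIn "implementation_manifest" a || PySem.Str.isIn "implementation_plan" t then
      "implementation_manifest"
    else if PySem.Str.isIn "extract_results" a || PySem.Str.isIn "results_extraction" t then
      "results_extraction"
    else if PySem.Str.isIn "experiment" t || PySem.Str.isIn "execution_log" a then
      "experiment_execution"
    else if ([".py", ".ipynb", "_code.", "_implementation."] : List String).any (fun ext => PySem.Str.isIn ext a) then
      "code_implementation"
    else
      "research_plan") =
    PySem.List.pyGetD gvcLabels
      (Int.ofNat ((PySem.List.min?
        (gvcPatterns.filterMap (fun p =>
          if PySem.Str.isIn p.2.2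
              (((PySem.Dict.empty.insert "task" t).insert "artifact" a).getD p.2.1 "")
            then some p.1 else none))
        (fun x => x)).getD 0)) "" := by
  have ht : ((PySem.Dict.empty.insert "task" t).insert "artifact" a).getD "task" "" = t := by
    simp [PySem.Dict.getD_insert]
  simp only [gvcPatterns, List.filterMap, List.any_cons, List.any_nil, Bool.or_false,
    PySem.Dict.getD_insert_self, ht]
  generalize PySem.Str.isIn "generate_initial_plan" t = b1
  generalize PySem.Str.isIn "refine_plan" t = b2
  generalize PySem.Str.isIn "implementation_manifest" a = b3
  generalize PySem.Str.isIn "implementation_plan" t = b4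
  generalize PySem.Str.isIn "extract_results" a = b5
  generalize PySem.Str.isIn "results_extraction" t = b6
  generalize PySem.Str.isIn "experiment" t = b7
  generalize PySem.Str.isIn "execution_log" a = b8
  generalize PySem.Str.isIn ".py" a = b9
  generalize PySem.Str.isIn ".ipynb" a = b10
  generalize PySem.Str.isIn "_code." a = b11
  generalize PySem.Str.isIn "_implementation." a = b12
  trans (PySem.List.pyGetD gvcLabels
      (Int.ofNat (if b1 || b2 then 0 else if b3 || b4 then 1 else if b5 || b6 then 2
        else if b7 || b8 then 3 else if b9 || (b10 || (b11 || b12)) then 4 else 0)) "")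
  · split_ifs <;> rfl
  · congr 2
    revert b1 b2 b3 b4 b5 b6 b7 b8 b9 b10 b11 b12
    decide

-- ===== VERDICT (by name: the statement is the Claim_ definition above) =====
theorem get_validation_context_spec : Claim_equal_get_validation_context := by
  intro ss _
  unfold Spec_get_validation_context get_validation_context get_validation_context_alt
  exact gvc_eq _ _
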